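-- pv_equiv track=rewrite | github.com/mateusz-wozny/spoiler_generation | spoiler_generation/utils/dataset_class.py | subfinder
-- ===== SOURCE A (Python) =====
-- def subfinder(mylist, pattern):
--     indexes = []
--     lengths_list = list(map(len, mylist))
--
--     for i in range(len(mylist)):
--         if mylist[i] == pattern[0] and mylist[i : i + len(pattern)] == pattern:
--             indexes.append(
--                 [
--                     sum(lengths_list[:i]) + i,
--                     sum(lengths_list[: i + len(pattern)]) + i + len(pattern) - 1,
--                 ]
--             )
--     return indexes
-- ===== SOURCE B (Python) =====
-- def subfinder(mylist, pattern):
--     m = len(pattern)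
--     prefix = [0]
--     for s in mylist:
--         prefix.append(prefix[-1] + len(s))
--     indexes = []
--     for i in range(len(mylist) - m + 1):
--         if mylist[i : i + m] == pattern:
--             indexes.append([prefix[i] + i, prefix[i + m] + i + m - 1])
--     return indexes
-- ===== Notes on version B (the rewrite author's own statement) =====
-- stated objective: faster
-- what changed: B computes a prefix-sum table of string lengths once and looks offsets up in O(1) per match, instead of A's re-summing lengths_list[:i] with sum() at every match, and B's scan stops at len(mylist)-len(pattern)+1.
-- outside the precondition, e.g. on subfinder([], []): A returns [], B returns [[0, -1]]
import Mathlib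
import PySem

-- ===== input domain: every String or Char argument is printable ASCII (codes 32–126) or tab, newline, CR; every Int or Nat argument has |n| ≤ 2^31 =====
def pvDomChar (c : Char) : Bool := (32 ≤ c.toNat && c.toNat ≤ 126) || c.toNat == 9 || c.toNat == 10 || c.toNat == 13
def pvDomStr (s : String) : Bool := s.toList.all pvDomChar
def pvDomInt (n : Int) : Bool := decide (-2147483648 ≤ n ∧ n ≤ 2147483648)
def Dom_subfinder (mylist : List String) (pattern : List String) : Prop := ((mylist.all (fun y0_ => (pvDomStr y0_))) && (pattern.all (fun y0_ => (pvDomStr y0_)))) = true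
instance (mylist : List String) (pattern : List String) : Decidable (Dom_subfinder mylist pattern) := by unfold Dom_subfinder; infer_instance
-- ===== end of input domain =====

-- B replaces A's per-match sum(lengths_list[:i]) re-summations by a prefix-sum table built once (faster).

-- ===== PORT A =====
def subfinder (mylist : List String) (pattern : List String) : List (List Int) :=
  let lengths_list : List Int := mylist.map (fun s => PySem.Str.len s)
  (PySem.List.pyRange 0 (mylist.length : Int) 1).foldl
    (fun indexes i =>
      -- pattern[0] raises IndexError when pattern = []; that input is excluded by Pre_, getD is exact on Pre_
      if PySem.List.pyGetD mylist i "" == PySem.List.pyGetD pattern 0 "" &&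
         PySem.List.slice mylist (some i) (some (i + (pattern.length : Int))) == pattern then
        indexes ++ [[(PySem.List.slice lengths_list none (some i)).sum + i,
                     (PySem.List.slice lengths_list none (some (i + (pattern.length : Int)))).sum
                       + i + (pattern.length : Int) - 1]]
      else indexes)
    []

-- ===== PORT B =====
def subfinder_alt (mylist : List String) (pattern : List String) : List (List Int) :=
  let m : Int := (pattern.length : Int)
  let pre : List Int :=
    mylist.foldl (fun p s => p ++ [PySem.List.pyGetD p (-1) 0 + PySem.Str.len s]) [(0 : Int)]
  (PySem.List.pyRange 0 ((mylist.length : Int) - m + 1) 1).foldl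
    (fun out i =>
      if PySem.List.slice mylist (some i) (some (i + m)) == pattern then
        out ++ [[PySem.List.pyGetD pre i 0 + i,
                 PySem.List.pyGetD pre (i + m) 0 + i + m - 1]]
      else out)
    []

-- ===== PRECONDITION & SPEC =====
-- Pre_ excludes an empty pattern: there A raises IndexError on pattern[0] for nonempty mylist, and
-- on the degenerate input ([], []) A's [] and B's [[0, -1]] ('the empty pattern matches at 0') are both defensible.
def Pre_subfinder (mylist : List String) (pattern : List String) : Prop := pattern ≠ []
instance (mylist : List String) (pattern : List String) : Decidable (Pre_subfinder mylist pattern) := by unfold Pre_subfinder; infer_instance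
def pvWitness_subfinder : List String × List String := (["ab", "c", "ab"], ["ab"])

def Spec_subfinder (mylist : List String) (pattern : List String) (out : List (List Int)) : Prop := out = subfinder_alt mylist pattern
instance (mylist : List String) (pattern : List String) (out : List (List Int)) : Decidable (Spec_subfinder mylist pattern out) := by unfold Spec_subfinder; infer_instance

-- ===== CLAIM (what is proved, stated in full; the proofs are below) =====
def Claim_equal_subfinder : Prop := ∀ (mylist : List String) (pattern : List String), Dom_subfinder mylist pattern → Pre_subfinder mylist pattern → Spec_subfinder mylist pattern (subfinder mylist pattern)

-- ===== LEMMAS AND PROOFS =====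

-- running partial sums of the lengths of xs starting from c
def pvTail (c : Int) : List String → List Int
  | [] => []
  | s :: xs => (c + PySem.Str.len s) :: pvTail (c + PySem.Str.len s) xs

lemma pvPrefix_eq (xs : List String) (p : List Int) (hp : p ≠ []) :
    xs.foldl (fun p s => p ++ [PySem.List.pyGetD p (-1) 0 + PySem.Str.len s]) p
      = p ++ pvTail (p.getLast hp) xs := by
  induction xs generalizing p with
  | nil => simp [pvTail]
  | cons s xs ih =>
      simp only [List.foldl_cons]
      have h1 : PySem.List.pyGetD p (-1) (0 : Int) = p.getLast hp :=
        PySem.List.pyGetD_neg_one p 0 hp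
      rw [h1, ih (p ++ [p.getLast hp + PySem.Str.len s]) (by simp)]
      simp [pvTail]

lemma pvTail_getD (xs : List String) (c : Int) (k : Nat) (hk : k ≤ xs.length) :
    (c :: pvTail c xs).getD k 0 = c + ((xs.take k).map PySem.Str.len).sum := by
  induction xs generalizing c k with
  | nil =>
      have : k = 0 := by simpa using hk
      subst this; simp
  | cons s xs ih =>
      cases k with
      | zero => simp
      | succ k =>
          simp only [pvTail, List.getD_cons_succ, List.take_succ_cons, List.map_cons,
            List.sum_cons]
          rw [ih (c + PySem.Str.len s) k (by simpa using hk)]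
          ring

-- a window shorter than the (nonempty) pattern never matches
lemma pvNoMatch (mylist pattern : List String) (i : Int) (hm : pattern ≠ []) (h0 : 0 ≤ i)
    (h : (mylist.length : Int) - (pattern.length : Int) < i) :
    PySem.List.slice mylist (some i) (some (i + (pattern.length : Int))) ≠ pattern := by
  intro hc
  have hmp : 0 < pattern.length := List.length_pos_iff.mpr hm
  have hl := congrArg List.length hc
  rw [PySem.List.slice_toNat mylist h0 (by omega)] at hl
  simp only [List.length_take, List.length_drop] at hl
  omega

-- a matching window starts with the pattern's first element
lemma pvFirstEq (mylist pattern : List String) (i : Int) (hm : pattern ≠ []) (h0 : 0 ≤ i)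
    (hs : PySem.List.slice mylist (some i) (some (i + (pattern.length : Int))) = pattern) :
    PySem.List.pyGetD mylist i "" = PySem.List.pyGetD pattern 0 "" := by
  obtain ⟨p, ps, rfl⟩ := List.exists_cons_of_ne_nil hm
  rw [PySem.List.slice_toNat mylist h0 (by omega)] at hs
  have hk : (i + ((p :: ps).length : Int)).toNat - i.toNat = (p :: ps).length := by omega
  rw [hk] at hs
  have hh : (mylist.drop i.toNat).head? = some p := by
    have h2 := congrArg List.head? hs
    simpa [List.head?_take] using h2
  rw [List.head?_drop] at hh
  have hi : i = ((i.toNat : Nat) : Int) := by omega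
  rw [hi, PySem.List.pyGetD_natCast, PySem.List.pyGetD_zero_cons]
  simp [List.getD, hh]

theorem subfinder_spec : Claim_equal_subfinder := by
  intro mylist pattern _ hm
  unfold Spec_subfinder
  simp only [subfinder, subfinder_alt]
  rw [PySem.List.foldl_append_if, PySem.List.foldl_append_if]
  simp only [List.nil_append]
  have hmp : 0 < pattern.length := List.length_pos_iff.mpr hm
  by_cases hnm : (mylist.length : Int) - (pattern.length : Int) + 1 ≤ 0
  · -- pattern longer than the list: both sides are empty
    rw [PySem.List.pyRange_one_eq_nil hnm]
    have : ((PySem.List.pyRange 0 (mylist.length : Int) 1).filter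
        (fun i => PySem.List.pyGetD mylist i "" == PySem.List.pyGetD pattern 0 "" &&
          PySem.List.slice mylist (some i) (some (i + (pattern.length : Int))) == pattern)) = [] := by
      rw [List.filter_eq_nil_iff]
      intro i hi
      have hi' := (PySem.List.mem_pyRange_one).mp hi
      have := pvNoMatch mylist pattern i hm hi'.1 (by omega)
      simp [this]
    rw [this]
    simp
  · rw [not_le] at hnm
    -- split A's range at mylist.length - pattern.length + 1; the high part never matches
    rw [PySem.List.pyRange_one_append 0 ((mylist.length : Int) - (pattern.length : Int) + 1)
        (mylist.length : Int) (by omega) (by omega), List.filter_append]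
    have hhigh : ((PySem.List.pyRange ((mylist.length : Int) - (pattern.length : Int) + 1)
        (mylist.length : Int) 1).filter
        (fun i => PySem.List.pyGetD mylist i "" == PySem.List.pyGetD pattern 0 "" &&
          PySem.List.slice mylist (some i) (some (i + (pattern.length : Int))) == pattern)) = [] := by
      rw [List.filter_eq_nil_iff]
      intro i hi
      have hi' := (PySem.List.mem_pyRange_one).mp hi
      have := pvNoMatch mylist pattern i hm (by omega) (by omega)
      simp [this]
    rw [hhigh, List.append_nil]
    -- on the low range the two filters agree
    rw [List.filter_congr (q := fun i =>
        PySem.List.slice mylist (some i) (some (i + (pattern.length : Int))) == pattern)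
      (by
        intro i hi
        have hi' := (PySem.List.mem_pyRange_one).mp hi
        by_cases hs : PySem.List.slice mylist (some i) (some (i + (pattern.length : Int))) = pattern
        · have := pvFirstEq mylist pattern i hm hi'.1 hs
          simp [hs, this]
        · simp [hs])]
    -- and the mapped entries agree
    apply List.map_congr_left
    intro i hi
    have hi' := (PySem.List.mem_pyRange_one).mp (List.mem_of_mem_filter hi)
    have h0 : 0 ≤ i := hi'.1
    have hub : i ≤ (mylist.length : Int) - (pattern.length : Int) := by omega
    -- the prefix-sum list of B
    have hpre : mylist.foldl (fun p s => p ++ [PySem.List.pyGetD p (-1) 0 + PySem.Str.len s])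
        [(0 : Int)] = (0 : Int) :: pvTail 0 mylist := by
      rw [pvPrefix_eq mylist [(0 : Int)] (by simp)]
      simp
    rw [hpre]
    have hlook : ∀ j : Int, 0 ≤ j → j ≤ (mylist.length : Int) →
        PySem.List.pyGetD ((0 : Int) :: pvTail 0 mylist) j 0
          = ((mylist.take j.toNat).map PySem.Str.len).sum := by
      intro j hj0 hjn
      have hj : j = ((j.toNat : Nat) : Int) := by omega
      rw [hj, PySem.List.pyGetD_natCast, pvTail_getD mylist 0 j.toNat (by omega)]
      simp only [Int.toNat_natCast, zero_add]
    rw [hlook i h0 (by omega), hlook (i + (pattern.length : Int)) (by omega) (by omega),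
        PySem.List.slice_to (mylist.map fun s => PySem.Str.len s) h0,
        PySem.List.slice_to (mylist.map fun s => PySem.Str.len s) (b := i + (pattern.length : Int)) (by omega),
        List.map_take, List.map_take]
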